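-- pv_equiv track=rewrite | github.com/HarryLu0708/DataStructuresAndAlgorithms | Python/Lab02/nim.py | create_game_state
-- ===== SOURCE A (Python) =====
-- def create_game_state(size,token_max):
--     """This function takes two parameters, size, and token max. It should return a newly created list of integers representing the number of tokens in each row."""
--     li = []
--     n = 1
--     for i in range(0,size):
--         li.append(n)
--         if n<token_max:
--             n += 1
--     return li
-- ===== SOURCE B (Python) =====
-- def create_game_state(size, token_max):
--     """Closed form: row i holds min(i+1, token_max), floored at 1."""
--     cap = max(token_max, 1)
--     return [min(i + 1, cap) for i in range(size)]
-- ===== Notes on version B (the rewrite author's own statement) =====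
-- stated objective: simpler
-- what changed: B replaces A's stateful loop with a conditionally incremented counter by a per-index closed form min(i+1, max(token_max,1)) evaluated independently in a comprehension.
import Mathlib
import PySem

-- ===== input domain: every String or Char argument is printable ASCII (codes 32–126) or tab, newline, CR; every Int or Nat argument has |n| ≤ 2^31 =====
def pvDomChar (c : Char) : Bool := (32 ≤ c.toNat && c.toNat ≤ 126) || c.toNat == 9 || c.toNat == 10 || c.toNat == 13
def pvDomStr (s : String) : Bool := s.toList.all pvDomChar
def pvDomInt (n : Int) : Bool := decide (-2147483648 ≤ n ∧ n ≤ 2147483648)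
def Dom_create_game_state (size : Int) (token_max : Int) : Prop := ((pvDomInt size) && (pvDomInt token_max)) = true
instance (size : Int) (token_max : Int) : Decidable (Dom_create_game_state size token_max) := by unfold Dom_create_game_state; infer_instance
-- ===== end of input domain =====

-- B replaces A's stateful loop (counter incremented while below token_max) by the
-- per-index closed form min(i+1, max(token_max,1)); same values, simpler structure.

-- ===== PORT A =====
-- literal port: li = [], n = 1; for i in range(0, size): li.append(n); if n < token_max: n += 1
def create_game_state (size : Int) (token_max : Int) : List Int :=
  ((PySem.List.pyRange 0 size 1).foldl
    (fun (st : List Int × Int) _ =>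
      (st.1 ++ [st.2], if st.2 < token_max then st.2 + 1 else st.2))
    ([], 1)).1

-- ===== PORT B =====
-- literal port of Source B: cap = max(token_max, 1); [min(i+1, cap) for i in range(size)]
def create_game_state_alt (size : Int) (token_max : Int) : List Int :=
  (PySem.List.pyRange 0 size 1).map (fun i => min (i + 1) (max token_max 1))

-- ===== PRECONDITION & SPEC =====
def Spec_create_game_state (size : Int) (token_max : Int) (out : List Int) : Prop := out = create_game_state_alt size token_max
instance (size : Int) (token_max : Int) (out : List Int) : Decidable (Spec_create_game_state size token_max out) := by unfold Spec_create_game_state; infer_instance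

-- ===== CLAIM (what is proved, stated in full; the proofs are below) =====
def Claim_equal_create_game_state : Prop := ∀ (size : Int) (token_max : Int), Dom_create_game_state size token_max → Spec_create_game_state size token_max (create_game_state size token_max)

-- ===== LEMMAS AND PROOFS =====

-- Loop invariant: after consuming a list of k (ignored) elements starting from counter
-- min (c+1) (max tm 1) with 0 <= c, the list is acc ++ [min (c+1+j) (max tm 1) | j < k].
theorem cgs_loop (tm : Int) (l : List Int) (acc : List Int) (c : Int) (hc : 0 ≤ c) :
    (l.foldl
      (fun (st : List Int × Int) _ =>
        (st.1 ++ [st.2], if st.2 < tm then st.2 + 1 else st.2))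
      (acc, min (c + 1) (max tm 1))).1
    = acc ++ (List.range l.length).map (fun (j : Nat) => min (c + 1 + (j : Int)) (max tm 1)) := by
  induction l generalizing acc c with
  | nil => simp
  | cons x xs ih =>
    simp only [List.foldl_cons, List.length_cons]
    have hstep : (if min (c + 1) (max tm 1) < tm then min (c + 1) (max tm 1) + 1
                  else min (c + 1) (max tm 1)) = min (c + 1 + 1) (max tm 1) := by
      split_ifs with hlt <;> omega
    rw [hstep, ih (acc ++ [min (c + 1) (max tm 1)]) (c + 1) (by omega),
        List.range_succ_eq_map, List.map_cons, List.map_map]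
    simp only [List.append_assoc, List.singleton_append, Nat.cast_zero, add_zero]
    congr 1
    congr 1
    apply List.map_congr_left
    intro j _
    simp only [Function.comp_apply, Nat.succ_eq_add_one]
    push_cast
    omega

theorem cgs_alt_eq (size tm : Int) :
    create_game_state_alt size tm
    = (List.range (PySem.List.pyRange 0 size 1).length).map
        (fun (j : Nat) => min ((0 : Int) + 1 + (j : Int)) (max tm 1)) := by
  unfold create_game_state_alt
  rw [PySem.List.pyRange_one, List.map_map]
  simp only [List.length_map, List.length_range]
  apply List.map_congr_left
  intro j _
  simp only [Function.comp_apply]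
  omega

-- ===== VERDICT (by name: the statement is the Claim_ definition above) =====
theorem create_game_state_spec : Claim_equal_create_game_state := by
  intro size tm _
  show create_game_state size tm = create_game_state_alt size tm
  unfold create_game_state
  have h1 : min ((0 : Int) + 1) (max tm 1) = 1 := by omega
  have h2 := cgs_loop tm (PySem.List.pyRange 0 size 1) [] 0 (by norm_num)
  rw [h1] at h2
  rw [h2, cgs_alt_eq]
  simp
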